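-- pv_equiv track=rewrite | github.com/JoachimFavre/PyMaTex | text_gestion.py | verify_maths
-- ===== SOURCE A (Python) =====
-- OPERATION_ORDER = {'+': 0, '*': 1, '^': 2}
--
-- def remove_spaces(string):
--     """
--     Returns the string given in parameters without any spaces.
--     """
--     return string.replace(' ', '')
--
-- def is_number(character):
--     """
--     Returns whether the character is a number.
--     [Note from like 6 months after having finished this code: I have learned
--      that there exists a character.isdecimal() function. But hey! The try
--      catch method is great! xD]
--     """
--     try:
--         int(character)
--         return True
--     except ValueError:
--         return False
--
-- def is_letter(character):
--     """
--     Returns whether the character is a letter.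
--     """
--     is_smaller_case = ord('a') <= ord(character) <= ord('z')
--     is_upper_case = ord('A') <= ord(character) <= ord('Z')
--     return is_smaller_case or is_upper_case
--
-- def is_operator(character):
--     """
--     Returns whether the character is an operator (in other words, if it is
--     in OPERATION_ORDER or if it is an "=" sign).
--     """
--     return character in OPERATION_ORDER or character == '='
--
-- def character_code(character):
--     """
--     Converts a character following the code hereinafter:
--         - nothing -> 0
--         - number -> 1
--         - letter -> 2
--         - operator -> 3
--         - opening_parenthesis -> 4
--         - closing_parenthesis -> 5
--     """
--     if character == '':
--         return 0
--     if is_number(character):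
--         return 1
--     if is_letter(character):
--         return 2
--     if is_operator(character):
--         return 3
--     if character == "(":
--         return 4
--     if character == ")":
--         return 5
--     return None
--
-- def verify_maths(expression):
--     """
--     Verifies that an expression makes sense mathematically speaking. It
--     looks at two characters following each others, and defines whether it
--     makes sense or not using a matrix. It also verifies if there is the
--     same number of opening parenthesis as closing ones. Make sure
--     to use this function on both sides of an equality to avoid things such as:
--         (a + b = c) * d
--     """
--
--     if expression.count('(') != expression.count(')'):
--         return False
--
--     # allowed[a, b] : a -> last character / b -> new character
--     # indices using character_code
--     # "empty" = beginning / end of expression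
--     allowed = [[True,  True,  True,  False, True,  False],
--                [True,  True,  False, True,  False, True],
--                [True,  False, False, True,  False, True],
--                [False, True,  True,  False, True,  False],
--                [False, True,  True,  False, True,  False],
--                [True,  False, False, True,  False, True]]
--
--     last_character = 0
--
--     for character in remove_spaces(expression):
--         character = character_code(character)
--         if character is None:
--             return False
--         if not allowed[last_character][character]:
--             return False
--         last_character = character
--
--     # Can finish on this character ?
--     return allowed[last_character][0]
-- ===== SOURCE B (Python) =====
-- OPERATION_ORDER = {'+': 0, '*': 1, '^': 2}
--
-- def remove_spaces(string):
--     return string.replace(' ', '')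
--
-- def is_number(character):
--     try:
--         int(character)
--         return True
--     except ValueError:
--         return False
--
-- def is_letter(character):
--     is_smaller_case = ord('a') <= ord(character) <= ord('z')
--     is_upper_case = ord('A') <= ord(character) <= ord('Z')
--     return is_smaller_case or is_upper_case
--
-- def is_operator(character):
--     return character in OPERATION_ORDER or character == '='
--
-- def character_code(character):
--     if character == '':
--         return 0
--     if is_number(character):
--         return 1
--     if is_letter(character):
--         return 2
--     if is_operator(character):
--         return 3
--     if character == "(":
--         return 4
--     if character == ")":
--         return 5
--     return None
--
-- def verify_maths(expression):
--     # Grammar-driven check: instead of the adjacency matrix, the valid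
--     # expressions are exactly those matching the grammar
--     #   expr := open* (digit+ | letter) close* ( operator expr )?
--     # (parentheses only counted, as in the original), parsed phase by phase.
--     if expression.count('(') != expression.count(')'):
--         return False
--     codes = []
--     for c in remove_spaces(expression):
--         k = character_code(c)
--         if k is None:
--             return False
--         codes.append(k)
--     if not codes:
--         return True
--     i, n = 0, len(codes)
--     while True:
--         while i < n and codes[i] == 4:      # opening parens
--             i += 1
--         if i < n and codes[i] == 1:         # digit+
--             i += 1
--             while i < n and codes[i] == 1:
--                 i += 1
--         elif i < n and codes[i] == 2:       # letter
--             i += 1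
--         else:
--             return False
--         while i < n and codes[i] == 5:      # closing parens
--             i += 1
--         if i == n:
--             return True
--         if codes[i] != 3:                   # operator, then repeat
--             return False
--         i += 1
-- ===== Notes on version B (the rewrite author's own statement) =====
-- stated objective: alternative
-- what changed: Replaces A's adjacency-matrix finite-state loop (a 6x6 allowed table with a running last_character state) by a grammar-based parser: B tokenises into category codes and then parses the explicit grammar expr := open* (digit+ | letter) close* (operator expr)? phase by phase, with no transition matrix at all.
import Mathlib
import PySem

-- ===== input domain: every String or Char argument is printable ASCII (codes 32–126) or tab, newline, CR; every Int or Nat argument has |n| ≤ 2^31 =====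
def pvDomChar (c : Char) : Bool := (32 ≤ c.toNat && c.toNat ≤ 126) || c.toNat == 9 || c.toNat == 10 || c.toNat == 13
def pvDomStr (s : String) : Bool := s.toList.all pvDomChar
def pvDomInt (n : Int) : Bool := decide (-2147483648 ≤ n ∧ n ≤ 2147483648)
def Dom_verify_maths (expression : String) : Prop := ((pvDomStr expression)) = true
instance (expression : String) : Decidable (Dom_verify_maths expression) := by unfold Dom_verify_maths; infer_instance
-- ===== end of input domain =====

-- B drops A's adjacency-matrix automaton and instead parses the token grammar
-- expr := open* (digit+ | letter) close* (operator expr)?  phase by phase (objective: alternative).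

-- ===== PORT A =====
-- shared same-module helpers (used verbatim by both Pythons)
def is_number (c : Char) : Bool := (PySem.Int.ofStr? (String.ofList [c])).isSome

def is_letter (c : Char) : Bool :=
  ('a'.toNat ≤ c.toNat && c.toNat ≤ 'z'.toNat) || ('A'.toNat ≤ c.toNat && c.toNat ≤ 'Z'.toNat)

def is_operator (c : Char) : Bool :=
  (c == '+' || c == '*' || c == '^') || c == '='

def character_code (c : Char) : Option Nat :=
  if is_number c then some 1
  else if is_letter c then some 2
  else if is_operator c then some 3
  else if c == '(' then some 4
  else if c == ')' then some 5
  else none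

def allowedM : List (List Bool) :=
  [[true,  true,  true,  false, true,  false],
   [true,  true,  false, true,  false, true],
   [true,  false, false, true,  false, true],
   [false, true,  true,  false, true,  false],
   [false, true,  true,  false, true,  false],
   [true,  false, false, true,  false, true]]

def allowedAt (a b : Nat) : Bool := (allowedM.getD a []).getD b false

-- the for-loop of A with early returns, state 'last_character'
def vmLoop (last : Nat) : List Char → Bool
  | [] => allowedAt last 0
  | c :: rest =>
    match character_code c with
    | none => false
    | some k => if allowedAt last k then vmLoop k rest else false

def verify_maths (expression : String) : Bool :=
  if PySem.Str.count expression "(" ≠ PySem.Str.count expression ")" then false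
  else vmLoop 0 (PySem.Str.replace expression " " "").toList

-- ===== PORT B =====
-- the codes-accumulating for-loop of B (early return None ↦ none)
def mathsCodes : List Char → Option (List Nat)
  | [] => some []
  | c :: rest =>
    match character_code c with
    | none => none
    | some k => (mathsCodes rest).map (k :: ·)

-- inner 'while i < n and codes[i] == k: i += 1' loops of B
def skipEq (k : Nat) : List Nat → List Nat
  | [] => []
  | x :: xs => if x = k then skipEq k xs else x :: xs

theorem skipEq_length_le (k : Nat) (l : List Nat) : (skipEq k l).length ≤ l.length := by
  induction l with
  | nil => simp [skipEq]
  | cons x xs ih => simp only [skipEq]; split <;> simp <;> omega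

-- B's outer 'while True' loop, transcribed as recursion on the remaining codes:
-- one round = skip opening parens, consume digit+ or letter (parseExpr), skip closing parens,
-- then end / operator / fail (parseTail).
mutual
def parseExpr (ts : List Nat) : Bool :=
  match h : skipEq 4 ts with
  | 1 :: r => parseTail (skipEq 1 r)
  | 2 :: r => parseTail r
  | _ => false
termination_by ts.length
decreasing_by
  · have h1 := skipEq_length_le 4 ts
    have h2 := skipEq_length_le 1 r
    rw [h] at h1; simp at h1; omega
  · have h1 := skipEq_length_le 4 ts
    rw [h] at h1; simp at h1; omega

def parseTail (ts : List Nat) : Bool :=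
  match h : skipEq 5 ts with
  | [] => true
  | 3 :: r => parseExpr r
  | _ => false
termination_by ts.length
decreasing_by
  have h1 := skipEq_length_le 5 ts
  rw [h] at h1; simp at h1; omega
end

def verify_maths_alt (expression : String) : Bool :=
  if PySem.Str.count expression "(" ≠ PySem.Str.count expression ")" then false
  else
    match mathsCodes (PySem.Str.replace expression " " "").toList with
    | none => false
    | some codes => if codes.isEmpty then true else parseExpr codes

-- ===== PRECONDITION & SPEC =====
def Spec_verify_maths (expression : String) (out : Bool) : Prop := out = verify_maths_alt expression
instance (expression : String) (out : Bool) : Decidable (Spec_verify_maths expression out) := by unfold Spec_verify_maths; infer_instance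

-- ===== CLAIM (what is proved, stated in full; the proofs are below) =====
def Claim_equal_verify_maths : Prop := ∀ (expression : String), Dom_verify_maths expression → Spec_verify_maths expression (verify_maths expression)

-- ===== LEMMAS AND PROOFS =====
-- A's loop factored through the code list: first the automaton on codes …
def fsm (last : Nat) : List Nat → Bool
  | [] => allowedAt last 0
  | k :: r => allowedAt last k && fsm k r

theorem vmLoop_eq_fsm (chars : List Char) (last : Nat) :
    vmLoop last chars =
      match mathsCodes chars with
      | none => false
      | some codes => fsm last codes := by
  induction chars generalizing last with
  | nil => simp [vmLoop, mathsCodes, fsm]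
  | cons c rest ih =>
    cases h : character_code c with
    | none => simp [vmLoop, mathsCodes, h]
    | some k =>
      simp only [vmLoop, mathsCodes, h]
      rw [ih k]
      cases hm : mathsCodes rest with
      | none => simp
      | some codes => simp [fsm]

theorem character_code_range (c : Char) (k : Nat) (h : character_code c = some k) :
    1 ≤ k ∧ k ≤ 5 := by
  unfold character_code at h
  split_ifs at h <;> simp only [Option.some.injEq, reduceCtorEq] at h <;> try omega

theorem mathsCodes_range (chars : List Char) (codes : List Nat)
    (h : mathsCodes chars = some codes) : ∀ x ∈ codes, 1 ≤ x ∧ x ≤ 5 := by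
  induction chars generalizing codes with
  | nil =>
    simp only [mathsCodes, Option.some.injEq] at h
    simp [← h]
  | cons c rest ih =>
    simp only [mathsCodes] at h
    cases hc : character_code c with
    | none => simp [hc] at h
    | some k =>
      simp only [hc, Option.map_eq_some_iff] at h
      obtain ⟨cs, hcs, rfl⟩ := h
      intro x hx
      rcases List.mem_cons.1 hx with rfl | hx
      · exact character_code_range c x hc
      · exact ih cs hcs x hx

theorem fsm_two_eq_five (l : List Nat) : fsm 2 l = fsm 5 l := by
  cases l <;> rfl

theorem fsm_three_eq_four (l : List Nat) : fsm 3 l = fsm 4 l := by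
  cases l <;> rfl

-- the key simultaneous induction: automaton states 4/5/1 against parser phases
theorem fsm_eq_parse (n : Nat) :
    ∀ l : List Nat, l.length ≤ n → (∀ x ∈ l, 1 ≤ x ∧ x ≤ 5) →
      (fsm 4 l = parseExpr l) ∧ (fsm 5 l = parseTail l) ∧
      (fsm 1 l = parseTail (skipEq 1 l)) := by
  induction n with
  | zero =>
    intro l hl _
    have : l = [] := List.eq_nil_of_length_eq_zero (Nat.le_zero.1 hl)
    subst this
    refine ⟨?_, ?_, ?_⟩ <;> simp [fsm, parseExpr, parseTail, skipEq, allowedAt, allowedM]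
  | succ n ih =>
    intro l hl hg
    cases l with
    | nil =>
      refine ⟨?_, ?_, ?_⟩ <;> simp [fsm, parseExpr, parseTail, skipEq, allowedAt, allowedM]
    | cons k r =>
      have hr : r.length ≤ n := by simpa using Nat.succ_le_succ_iff.1 hl
      have hgr : ∀ x ∈ r, 1 ≤ x ∧ x ≤ 5 := fun x hx => hg x (List.mem_cons_of_mem _ hx)
      obtain ⟨ih4, ih5, ih1⟩ := ih r hr hgr
      have ih2 : fsm 2 r = parseTail r := (fsm_two_eq_five r).trans ih5
      have ih3 : fsm 3 r = parseExpr r := (fsm_three_eq_four r).trans ih4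
      have hk := hg k (List.mem_cons_self)
      have hk5 : k = 1 ∨ k = 2 ∨ k = 3 ∨ k = 4 ∨ k = 5 := by omega
      refine ⟨?_, ?_, ?_⟩
      · -- fsm 4 (k::r) = parseExpr (k::r)
        rcases hk5 with rfl | rfl | rfl | rfl | rfl
        · rw [parseExpr]; simp [skipEq, fsm, allowedAt, allowedM, ih1]
        · rw [parseExpr]; simp [skipEq, fsm, allowedAt, allowedM, ih2]
        · rw [parseExpr]; simp [skipEq, fsm, allowedAt, allowedM]
        · rw [parseExpr]
          conv_rhs => rw [show skipEq 4 (4 :: r) = skipEq 4 r from by simp [skipEq]]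
          rw [← parseExpr]
          simp [fsm, allowedAt, allowedM, ih4]
        · rw [parseExpr]; simp [skipEq, fsm, allowedAt, allowedM]
      · -- fsm 5 (k::r) = parseTail (k::r)
        rcases hk5 with rfl | rfl | rfl | rfl | rfl
        · rw [parseTail]; simp [skipEq, fsm, allowedAt, allowedM]
        · rw [parseTail]; simp [skipEq, fsm, allowedAt, allowedM]
        · rw [parseTail]; simp [skipEq, fsm, allowedAt, allowedM, ih3]
        · rw [parseTail]; simp [skipEq, fsm, allowedAt, allowedM]
        · rw [parseTail]
          conv_rhs => rw [show skipEq 5 (5 :: r) = skipEq 5 r from by simp [skipEq]]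
          rw [← parseTail]
          simp [fsm, allowedAt, allowedM, ih5]
      · -- fsm 1 (k::r) = parseTail (skipEq 1 (k::r))
        rcases hk5 with rfl | rfl | rfl | rfl | rfl
        · rw [show skipEq 1 (1 :: r) = skipEq 1 r from by simp [skipEq]]
          simp [fsm, allowedAt, allowedM, ih1]
        · rw [show skipEq 1 (2 :: r) = 2 :: r from by simp [skipEq]]
          rw [parseTail]; simp [skipEq, fsm, allowedAt, allowedM]
        · rw [show skipEq 1 (3 :: r) = 3 :: r from by simp [skipEq]]
          rw [parseTail]; simp [skipEq, fsm, allowedAt, allowedM, ih3]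
        · rw [show skipEq 1 (4 :: r) = 4 :: r from by simp [skipEq]]
          rw [parseTail]; simp [skipEq, fsm, allowedAt, allowedM]
        · rw [show skipEq 1 (5 :: r) = 5 :: r from by simp [skipEq]]
          rw [parseTail]
          conv_rhs => rw [show skipEq 5 (5 :: r) = skipEq 5 r from by simp [skipEq]]
          rw [← parseTail]
          simp [fsm, allowedAt, allowedM, ih5]

theorem fsm_zero (l : List Nat) (hg : ∀ x ∈ l, 1 ≤ x ∧ x ≤ 5) :
    fsm 0 l = if l.isEmpty then true else parseExpr l := by
  cases l with
  | nil => simp [fsm, allowedAt, allowedM]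
  | cons k r =>
    have hk := hg k (List.mem_cons_self)
    have h4 : fsm 4 (k :: r) = parseExpr (k :: r) :=
      (fsm_eq_parse (k :: r).length (k :: r) le_rfl hg).1
    have hk5 : k = 1 ∨ k = 2 ∨ k = 3 ∨ k = 4 ∨ k = 5 := by omega
    simp only [List.isEmpty_cons, Bool.false_eq_true, if_false]
    rw [← h4]
    rcases hk5 with rfl | rfl | rfl | rfl | rfl <;> simp [fsm, allowedAt, allowedM]

theorem verify_maths_eq_alt (e : String) : verify_maths e = verify_maths_alt e := by
  unfold verify_maths verify_maths_alt
  split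
  · rfl
  · rw [vmLoop_eq_fsm]
    cases hm : mathsCodes (PySem.Str.replace e " " "").toList with
    | none => rfl
    | some codes => exact fsm_zero codes (mathsCodes_range _ _ hm)

-- ===== VERDICT (by name: the statement is the Claim_ definition above) =====
theorem verify_maths_spec : Claim_equal_verify_maths := by
  intro e _
  unfold Spec_verify_maths
  exact verify_maths_eq_alt e
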